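-- pv_equiv track=rewrite | github.com/YingaoWang-casia/CoDeTT.github.io- | CoDeTT_benchmark/benchmark_minicpm.py | parse_assistant_triple
-- ===== SOURCE A (Python) =====
-- from typing import Any, Dict, List, Optional, Tuple
--
-- def normalize_token_tag(x: str) -> str:
--     if not x:
--         return ""
--     s = str(x).replace("<|", "").replace("|>", "").strip()
--     return s[:1].upper() + s[1:] if s else ""
--
-- def parse_assistant_triple(text: str) -> Tuple[str, str, str]:
--     """
--     兼容两种输出：
--     1) 两 token：<|DecisionStrategy|><|SpecificScenario|>
--     2) 三 token：<|SystemIdle|><|DecisionStrategy|><|SpecificScenario|>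
--     """
--     if not text:
--         return "", "", ""
--     tokens = []
--     i = 0
--     while True:
--         a = text.find("<|", i)
--         if a < 0:
--             break
--         b = text.find("|>", a)
--         if b < 0:
--             break
--         tokens.append(normalize_token_tag(text[a:b + 2]))
--         i = b + 2
--
--     if len(tokens) >= 3 and tokens[0] in ("SystemIdle", "SystemSpeaking"):
--         return tokens[0], tokens[1], tokens[2]
--     if len(tokens) >= 2:
--         return "", tokens[0], tokens[1]
--     return "", "", ""
-- ===== SOURCE B (Python) =====
-- from typing import Tuple
--
-- def normalize_token_tag(x: str) -> str:
--     if not x: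
--         return ""
--     s = str(x).replace("<|", "").replace("|>", "").strip()
--     return s[:1].upper() + s[1:] if s else ""
--
-- def parse_assistant_triple(text: str) -> Tuple[str, str, str]:
--     # Staged algorithm: first index every delimiter occurrence, then pair the
--     # two sorted position lists with a two-pointer merge (no substring searches
--     # during the pairing phase).
--     opens = [p for p in range(len(text)) if text[p:p + 2] == "<|"]
--     closes = [p for p in range(len(text)) if text[p:p + 2] == "|>"]
--     tokens = []
--     oi = ci = bound = 0
--     while oi < len(opens) and ci < len(closes):
--         a, b = opens[oi], closes[ci]
--         if a < bound:
--             oi += 1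
--         elif b < a:
--             ci += 1
--         else:
--             tokens.append(normalize_token_tag(text[a:b + 2]))
--             bound = b + 2
--             ci += 1
--     if len(tokens) >= 3 and tokens[0] in ("SystemIdle", "SystemSpeaking"):
--         return tokens[0], tokens[1], tokens[2]
--     if len(tokens) >= 2:
--         return "", tokens[0], tokens[1]
--     return "", "", ""
-- ===== Notes on version B (the rewrite author's own statement) =====
-- stated objective: alternative
-- what changed: Replaces A's interleaved while-loop of repeated text.find calls with a staged algorithm: one indexing pass builds the sorted position lists of all '<|' and '|>' occurrences, and a two-pointer merge over those two lists pairs openers with closers (no substring searching during pairing); the trailing classification is unchanged.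
import Mathlib
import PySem

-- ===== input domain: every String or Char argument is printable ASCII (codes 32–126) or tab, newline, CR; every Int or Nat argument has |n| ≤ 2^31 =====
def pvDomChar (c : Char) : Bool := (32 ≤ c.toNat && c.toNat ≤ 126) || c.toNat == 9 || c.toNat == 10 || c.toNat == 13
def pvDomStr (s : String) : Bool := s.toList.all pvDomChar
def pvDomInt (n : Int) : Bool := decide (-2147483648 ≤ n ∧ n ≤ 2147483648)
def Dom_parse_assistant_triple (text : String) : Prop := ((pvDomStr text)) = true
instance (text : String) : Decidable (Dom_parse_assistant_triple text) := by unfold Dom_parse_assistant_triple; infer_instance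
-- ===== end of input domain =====

-- B replaces A's interleaved find-loop by a staged algorithm: index every "<|" and "|>"
-- occurrence position first, then pair the two sorted position lists with a two-pointer
-- merge; objective: alternative (same cost, different algorithm).

-- normalize_token_tag, identical in both Python sources (shared helper)
def pvNorm (x : List Char) : String :=
  if x = [] then ""
  else
    let s := PySem.Chars.strip (PySem.Chars.replace (PySem.Chars.replace x ['<', '|'] []) ['|', '>'] [])
    if s = [] then ""
    else String.ofList (PySem.Chars.upper (PySem.List.slice s none (some 1)) ++ PySem.List.slice s (some 1) none)

-- ===== PORT A =====
-- used by pvAloop's decreasing_by: a non-negative findFrom result is ≥ its (non-negative) start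
lemma pvFindFrom_facts (s sub : List Char) (k : Int) (hk : 0 ≤ k)
    (h : ¬ PySem.Chars.findFrom s sub k none < 0) :
    k ≤ PySem.Chars.findFrom s sub k none ∧ k ≤ (s.length : Int) := by
  have hf := PySem.Chars.neg_one_le_find (List.drop k.toNat (List.take (Int.toNat (s.length : Int)) s)) sub
  unfold PySem.Chars.findFrom at h ⊢
  dsimp only at h ⊢
  split_ifs at h ⊢ <;> omega

def pvAloop (s : List Char) (i : Nat) (tokens : List String) : List String :=
  if _ha : PySem.Chars.findFrom s ['<', '|'] (i : Int) < 0 then tokens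
  else if _hb : PySem.Chars.findFrom s ['|', '>'] (PySem.Chars.findFrom s ['<', '|'] (i : Int)) < 0 then tokens
  else
    pvAloop s (PySem.Chars.findFrom s ['|', '>'] (PySem.Chars.findFrom s ['<', '|'] (i : Int)) + 2).toNat
      (tokens ++ [pvNorm (PySem.List.slice s (some (PySem.Chars.findFrom s ['<', '|'] (i : Int)))
        (some (PySem.Chars.findFrom s ['|', '>'] (PySem.Chars.findFrom s ['<', '|'] (i : Int)) + 2)))])
termination_by s.length + 1 - i
decreasing_by
  have h1 := pvFindFrom_facts s ['<', '|'] (i : Int) (by positivity) _ha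
  have h2 := pvFindFrom_facts s ['|', '>'] _ (by omega) _hb
  omega

def parse_assistant_triple (text : String) : String × String × String :=
  if text = "" then ("", "", "")
  else
    let tokens := pvAloop text.toList 0 []
    if 3 ≤ tokens.length ∧ (tokens.getD 0 "" = "SystemIdle" ∨ tokens.getD 0 "" = "SystemSpeaking") then
      (tokens.getD 0 "", tokens.getD 1 "", tokens.getD 2 "")
    else if 2 ≤ tokens.length then ("", tokens.getD 0 "", tokens.getD 1 "")
    else ("", "", "")

-- ===== PORT B =====
-- occurrence positions of a delimiter: [p for p in range(len(text)) if text[p:p+2] == pat]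
def pvPositions (s : List Char) (pat : List Char) : List Nat :=
  (List.range s.length).filter (fun p => PySem.List.slice s (some (p : Int)) (some ((p : Int) + 2)) = pat)

-- the two-pointer pairing loop over the two sorted position lists
def pvPair (s : List Char) (opens closes : List Nat) (oi ci bound : Nat) (tokens : List String) : List String :=
  if _h : oi < opens.length ∧ ci < closes.length then
    let a := opens.getD oi 0
    let b := closes.getD ci 0
    if a < bound then pvPair s opens closes (oi + 1) ci bound tokens
    else if b < a then pvPair s opens closes oi (ci + 1) bound tokens
    else pvPair s opens closes oi (ci + 1) (b + 2)
      (tokens ++ [pvNorm (PySem.List.slice s (some (a : Int)) (some ((b : Int) + 2)))])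
  else tokens
termination_by (opens.length - oi) + (closes.length - ci)
decreasing_by all_goals omega

def parse_assistant_triple_alt (text : String) : String × String × String :=
  let s := text.toList
  let opens := pvPositions s ['<', '|']
  let closes := pvPositions s ['|', '>']
  let tokens := pvPair s opens closes 0 0 0 []
  if 3 ≤ tokens.length ∧ (tokens.getD 0 "" = "SystemIdle" ∨ tokens.getD 0 "" = "SystemSpeaking") then
    (tokens.getD 0 "", tokens.getD 1 "", tokens.getD 2 "")
  else if 2 ≤ tokens.length then ("", tokens.getD 0 "", tokens.getD 1 "")
  else ("", "", "")

-- ===== PRECONDITION & SPEC =====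
def Spec_parse_assistant_triple (text : String) (out : String × String × String) : Prop := out = parse_assistant_triple_alt text
instance (text : String) (out : String × String × String) : Decidable (Spec_parse_assistant_triple text out) := by unfold Spec_parse_assistant_triple; infer_instance

-- ===== CLAIM (what is proved, stated in full; the proofs are below) =====
def Claim_equal_parse_assistant_triple : Prop := ∀ (text : String), Dom_parse_assistant_triple text → Spec_parse_assistant_triple text (parse_assistant_triple text)

-- ===== LEMMAS AND PROOFS =====

-- p is an occurrence position iff the two-character pattern is a prefix of s.drop p
lemma pvMemPositions (s pat : List Char) (hlen : pat.length = 2) (p : Nat) :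
    p ∈ pvPositions s pat ↔ pat <+: s.drop p := by
  unfold pvPositions
  rw [List.mem_filter, List.mem_range]
  have hc : ((p : Int) + 2) = ((p + 2 : Nat) : Int) := by push_cast; ring
  rw [hc, PySem.List.slice_natCast]
  have ht : p + 2 - p = 2 := by omega
  rw [ht]
  constructor
  · rintro ⟨_, h2⟩
    rw [List.prefix_iff_eq_take, hlen, of_decide_eq_true h2]
  · intro h
    have hb := h.length_le
    simp only [List.length_drop, hlen] at hb
    refine ⟨by omega, decide_eq_true ?_⟩
    rw [List.prefix_iff_eq_take, hlen] at h
    exact h.symm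

lemma pvPositionsSorted (s pat : List Char) : (pvPositions s pat).Pairwise (· < ·) :=
  List.pairwise_lt_range.filter _

lemma pvPrefixBound (a b : Char) (L : List Char) (p : Nat) (h : [a, b] <+: L.drop p) :
    p + 2 ≤ L.length := by
  have := h.length_le
  simp at this
  omega

lemma pvFindEqNat (L sub : List Char) (j : Nat) (hpre : sub <+: L.drop j)
    (hmin : ∀ q < j, ¬ sub <+: L.drop q) : PySem.Chars.find L sub = (j : Int) := by
  have hinf : sub <:+: L := hpre.isInfix.trans (L.drop_suffix j).isInfix
  have h0 : 0 ≤ PySem.Chars.find L sub := (PySem.Chars.find_nonneg_iff L sub).mpr hinf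
  obtain ⟨hp, hm⟩ := PySem.Chars.find_spec h0
  have : (PySem.Chars.find L sub).toNat = j := by
    rcases Nat.lt_trichotomy (PySem.Chars.find L sub).toNat j with hlt | he | hgt
    · exact absurd hp (hmin _ hlt)
    · exact he
    · exact absurd hpre (hm j hgt)
  omega

lemma pvFindFromEqNat (s sub : List Char) (k j : Nat) (hk : k ≤ s.length) (hkj : k ≤ j)
    (hpre : sub <+: s.drop j) (hmin : ∀ p, k ≤ p → p < j → ¬ sub <+: s.drop p) :
    PySem.Chars.findFrom s sub (k : Int) none = (j : Int) := by
  rw [PySem.Chars.findFrom_natCast s sub k hk]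
  have hfind : PySem.Chars.find (s.drop k) sub = ((j - k : Nat) : Int) := by
    apply pvFindEqNat
    · rw [List.drop_drop]
      have : k + (j - k) = j := by omega
      rw [this]; exact hpre
    · intro q hq
      rw [List.drop_drop]
      exact hmin (k + q) (by omega) (by omega)
  rw [hfind]
  have : ((j - k : Nat) : Int) ≠ -1 := by omega
  simp only [this, if_false]
  omega

lemma pvFindFromNeg (s sub : List Char) (k : Nat) (hk : k ≤ s.length)
    (h : ∀ p, k ≤ p → ¬ sub <+: s.drop p) :
    PySem.Chars.findFrom s sub (k : Int) none = -1 := by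
  rw [PySem.Chars.findFrom_natCast_eq_neg_one_iff s sub k hk]
  intro hinf
  have : PySem.Chars.isIn sub (s.drop k) = true := (PySem.Chars.isIn_iff_infix sub (s.drop k)).mpr hinf
  obtain ⟨q, hq⟩ := (PySem.Chars.exists_prefix_drop_iff_isIn sub (s.drop k)).mpr this
  rw [List.drop_drop] at hq
  exact h (k + q) (by omega) hq

-- membership in take (oi+1), split into the first oi elements and the oi-th one
lemma pvTakeSucc (l : List Nat) (oi : Nat) (hoi : oi < l.length) (p : Nat) :
    p ∈ l.take (oi + 1) ↔ p ∈ l.take oi ∨ p = l.getD oi 0 := by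
  rw [List.take_add_one, List.mem_append, List.getElem?_eq_getElem hoi,
      List.getD_eq_getElem l 0 hoi]
  simp

-- in a strictly sorted list, any member below the oi-th element sits among the first oi elements
lemma pvMemTakeOfLt (l : List Nat) (hs : l.Pairwise (· < ·)) (q oi : Nat)
    (hq : q ∈ l) (hoi : oi < l.length) (hlt : q < l.getD oi 0) : q ∈ l.take oi := by
  obtain ⟨k, hk, hkq⟩ := List.mem_iff_getElem.mp hq
  have hko : k < oi := by
    by_contra hko
    have hle : l.getD oi 0 ≤ l[k] := by
      rw [List.getD_eq_getElem l 0 hoi]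
      rcases Nat.eq_or_lt_of_le (Nat.le_of_not_lt hko) with he | hl
      · cases he; exact le_rfl
      · exact le_of_lt (List.pairwise_iff_getElem.mp hs oi k hoi hk hl)
    omega
  have hkt : k < (l.take oi).length := by
    rw [List.length_take]; omega
  have : (l.take oi)[k] = q := by rw [List.getElem_take, hkq]
  exact this ▸ List.getElem_mem hkt

-- in a strictly sorted list whose first oi elements are < bound, the oi-th element
-- is ≤ every member that is ≥ bound
lemma pvFirstGe (l : List Nat) (hs : l.Pairwise (· < ·)) (oi bound q : Nat)
    (h1 : ∀ p ∈ l.take oi, p < bound) (hoi : oi < l.length)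
    (hq : q ∈ l) (hqb : bound ≤ q) : l.getD oi 0 ≤ q := by
  by_contra hlt
  exact absurd (h1 q (pvMemTakeOfLt l hs q oi hq hoi (by omega))) (by omega)

-- the main invariant: the two-pointer merge from pointers (oi, ci) with lower bound `bound`
-- computes exactly A's find-loop started at `bound`
lemma pvPairMain (s : List Char) :
    ∀ m oi ci bound acc,
      ((pvPositions s ['<', '|']).length - oi) + ((pvPositions s ['|', '>']).length - ci) = m →
      bound ≤ s.length →
      (∀ p ∈ (pvPositions s ['<', '|']).take oi, p < bound) →
      (∀ p ∈ (pvPositions s ['|', '>']).take ci, ∀ q, bound ≤ q → ['<', '|'] <+: s.drop q → p < q) →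
      pvPair s (pvPositions s ['<', '|']) (pvPositions s ['|', '>']) oi ci bound acc = pvAloop s bound acc := by
  have hO := pvMemPositions s ['<', '|'] rfl
  have hC := pvMemPositions s ['|', '>'] rfl
  have hOs := pvPositionsSorted s ['<', '|']
  have hCs := pvPositionsSorted s ['|', '>']
  set O := pvPositions s ['<', '|'] with hOdef
  set C := pvPositions s ['|', '>'] with hCdef
  intro m
  induction m using Nat.strong_induction_on with
  | _ m IH =>
  intro oi ci bound acc hm hbl h1 h2
  rw [pvPair.eq_def]
  by_cases h : oi < O.length ∧ ci < C.length
  · rw [dif_pos h]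
    obtain ⟨hoi, hci⟩ := h
    simp only
    have haO : O.getD oi 0 ∈ O := by
      rw [List.getD_eq_getElem O 0 hoi]; exact List.getElem_mem hoi
    have hbC : C.getD ci 0 ∈ C := by
      rw [List.getD_eq_getElem C 0 hci]; exact List.getElem_mem hci
    set a := O.getD oi 0 with ha
    set b := C.getD ci 0 with hb
    have haP : ['<', '|'] <+: s.drop a := (hO a).mp haO
    have hbP : ['|', '>'] <+: s.drop b := (hC b).mp hbC
    have haL : a + 2 ≤ s.length := pvPrefixBound _ _ s a haP
    have hbL : b + 2 ≤ s.length := pvPrefixBound _ _ s b hbP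
    by_cases hab : a < bound
    · rw [if_pos hab]
      apply IH (O.length - (oi + 1) + (C.length - ci)) (by omega) (oi + 1) ci bound acc rfl hbl ?_ h2
      intro p hp
      rcases (pvTakeSucc O oi hoi p).mp hp with hp' | hp'
      · exact h1 p hp'
      · omega
    · rw [if_neg hab]
      by_cases hba : b < a
      · rw [if_pos hba]
        apply IH (O.length - oi + (C.length - (ci + 1))) (by omega) oi (ci + 1) bound acc rfl hbl h1 ?_
        intro p hp q hq hqP
        rcases (pvTakeSucc C ci hci p).mp hp with hp' | hp'
        · exact h2 p hp' q hq hqP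
        · have haq : a ≤ q := pvFirstGe O hOs oi bound q h1 hoi ((hO q).mpr hqP) hq
          omega
      · rw [if_neg hba]
        -- A's first find from `bound` is exactly a, its second find from a is exactly b
        have hfa : PySem.Chars.findFrom s ['<', '|'] ((bound : Nat) : Int) none = ((a : Nat) : Int) := by
          apply pvFindFromEqNat s _ bound a hbl (by omega) haP
          intro q hq1 hq2 hqP
          exact absurd (h1 q (pvMemTakeOfLt O hOs q oi ((hO q).mpr hqP) hoi hq2)) (by omega)
        have hfb : PySem.Chars.findFrom s ['|', '>'] ((a : Nat) : Int) none = ((b : Nat) : Int) := by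
          apply pvFindFromEqNat s _ a b (by omega) (by omega) hbP
          intro q hq1 hq2 hqP
          have := h2 q (pvMemTakeOfLt C hCs q ci ((hC q).mpr hqP) hci hq2) a (by omega) haP
          omega
        rw [pvAloop.eq_def, hfa]
        rw [dif_neg (show ¬ ((a : Nat) : Int) < 0 by omega)]
        rw [hfb]
        rw [dif_neg (show ¬ ((b : Nat) : Int) < 0 by omega)]
        have htn : (((b : Nat) : Int) + 2).toNat = b + 2 := by omega
        rw [htn]
        rw [← IH (O.length - oi + (C.length - (ci + 1))) (by omega) oi (ci + 1) (b + 2)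
              (acc ++ [pvNorm (PySem.List.slice s (some ((a : Nat) : Int)) (some (((b : Nat) : Int) + 2)))])
              rfl (by omega) ?_ ?_]
        · intro p hp
          have := h1 p hp
          omega
        · intro p hp q hq hqP
          rcases (pvTakeSucc C ci hci p).mp hp with hp' | hp'
          · exact h2 p hp' q (by omega) hqP
          · omega
  · rw [dif_neg h]
    by_cases hoi : oi < O.length
    · -- the closes are exhausted: every close is below every remaining open
      have hci : ¬ ci < C.length := fun hc => h ⟨hoi, hc⟩
      have hCt : C.take ci = C := List.take_of_length_le (by omega)
      rw [pvAloop.eq_def]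
      by_cases hfa : PySem.Chars.findFrom s ['<', '|'] ((bound : Nat) : Int) none < 0
      · rw [dif_pos hfa]
      · rw [dif_neg hfa]
        obtain ⟨hge, hpre, _⟩ := PySem.Chars.findFrom_natCast_spec s ['<', '|'] bound hbl (by omega)
        have hfeq : PySem.Chars.findFrom s ['<', '|'] ((bound : Nat) : Int) none =
            (((PySem.Chars.findFrom s ['<', '|'] ((bound : Nat) : Int) none).toNat : Nat) : Int) := by
          omega
        have hfb : PySem.Chars.findFrom s ['|', '>']
            (PySem.Chars.findFrom s ['<', '|'] ((bound : Nat) : Int) none) none = -1 := by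
          rw [hfeq]
          apply pvFindFromNeg s _ _ (by have := pvPrefixBound _ _ s _ hpre; omega)
          intro p hp hpP
          have hpC : p ∈ C.take ci := by rw [hCt]; exact (hC p).mpr hpP
          have := h2 p hpC (PySem.Chars.findFrom s ['<', '|'] ((bound : Nat) : Int) none).toNat (by omega) hpre
          omega
        rw [dif_pos (by rw [hfb]; omega)]
    · -- the opens are exhausted: no open position at or beyond `bound` remains
      have hOt : O.take oi = O := List.take_of_length_le (by omega)
      have hfa : PySem.Chars.findFrom s ['<', '|'] ((bound : Nat) : Int) none = -1 := by
        apply pvFindFromNeg s _ bound hbl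
        intro p hp hpP
        exact absurd (h1 p (by rw [hOt]; exact (hO p).mpr hpP)) (by omega)
      rw [pvAloop.eq_def, dif_pos (by rw [hfa]; omega)]

-- ===== VERDICT (by name: the statement is the Claim_ definition above) =====
theorem parse_assistant_triple_spec : Claim_equal_parse_assistant_triple := by
  intro text _
  unfold Spec_parse_assistant_triple parse_assistant_triple parse_assistant_triple_alt
  have hmain := pvPairMain text.toList _ 0 0 0 [] rfl (by omega) (by simp) (by simp)
  by_cases he : text = ""
  · subst he
    have hp : pvPair [] (pvPositions [] ['<', '|']) (pvPositions [] ['|', '>']) 0 0 0 [] = [] := by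
      rw [pvPair.eq_def]
      simp [pvPositions]
    simp [hp]
  · rw [if_neg he]
    simp only [hmain]
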